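-- pv_equiv track=rewrite | github.com/insyhmi/lanxiol-s-mcc-2022-approach | mcc 2022 1 grammar.py | grammarcheck
-- ===== SOURCE A (Python) =====
-- GRAPH = [
--     ['WE', 'DONT'],
--     ['THEY', 'DONT'],
--     ['DONT', 'KNOW'],
--     ['WE', 'KNOW'],
--     ['THEY', 'KNOW'],
--     ['KNOW', 'WE'],
--     ['KNOW', 'THEY'],
--     ['KNOW', 'THAT'],
--     ['THAT', 'WE'],
--     ['THAT', 'THEY']
-- ]
--
-- def grammarcheck(sentence):
--     if len (sentence) > 1:
--         check = [sentence[0], sentence[1]]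
--         if check in GRAPH:
--             sentence.pop(0)
--             return grammarcheck(sentence)
--         return False
--     else:
--         return True
-- ===== SOURCE B (Python) =====
-- GRAPH_SET = {
--     ('WE', 'DONT'), ('THEY', 'DONT'), ('DONT', 'KNOW'), ('WE', 'KNOW'),
--     ('THEY', 'KNOW'), ('KNOW', 'WE'), ('KNOW', 'THEY'), ('KNOW', 'THAT'),
--     ('THAT', 'WE'), ('THAT', 'THEY'),
-- }
--
-- def grammarcheck(sentence):
--     # Return-value equivalent to A; does NOT mutate `sentence` (A pops the
--     # leading words it has validated).
--     return all(pair in GRAPH_SET for pair in zip(sentence, sentence[1:]))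
-- ===== Notes on version B (the rewrite author's own statement) =====
-- stated objective: idiomatic
-- what changed: Replaces A's head-popping recursion with a single non-mutating pass that checks every adjacent word pair (zip against the tail) for membership in a precomputed set of edge tuples; unlike A it leaves the input list unmodified (return value equivalence only).
import Mathlib
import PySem

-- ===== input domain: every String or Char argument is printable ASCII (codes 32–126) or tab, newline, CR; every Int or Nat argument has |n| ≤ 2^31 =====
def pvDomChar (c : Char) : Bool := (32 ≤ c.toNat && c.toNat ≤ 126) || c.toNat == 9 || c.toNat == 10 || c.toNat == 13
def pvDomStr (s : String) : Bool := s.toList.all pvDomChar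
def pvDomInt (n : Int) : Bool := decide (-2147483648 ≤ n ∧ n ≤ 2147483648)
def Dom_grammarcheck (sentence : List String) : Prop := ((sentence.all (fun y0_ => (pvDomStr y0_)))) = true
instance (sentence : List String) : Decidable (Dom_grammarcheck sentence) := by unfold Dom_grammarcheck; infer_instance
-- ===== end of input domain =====

-- ===== PORT A =====
-- B changes A's head-popping recursion into one non-mutating adjacent-pair scan with a set
-- of edge tuples; equivalence claimed for the RETURN value only (Python A mutates `sentence`,
-- Python B does not).
def GRAPH : List (List String) :=
  [["WE", "DONT"], ["THEY", "DONT"], ["DONT", "KNOW"], ["WE", "KNOW"],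
   ["THEY", "KNOW"], ["KNOW", "WE"], ["KNOW", "THEY"], ["KNOW", "THAT"],
   ["THAT", "WE"], ["THAT", "THEY"]]

def grammarcheck (sentence : List String) : Bool :=
  match sentence with
  | a :: b :: rest =>
      if GRAPH.contains [a, b] then grammarcheck (b :: rest)
      else false
  | _ => true

-- ===== PORT B =====
def GRAPH_SET : PySem.Set (String × String) :=
  PySem.Set.ofList
    [("WE", "DONT"), ("THEY", "DONT"), ("DONT", "KNOW"), ("WE", "KNOW"),
     ("THEY", "KNOW"), ("KNOW", "WE"), ("KNOW", "THEY"), ("KNOW", "THAT"),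
     ("THAT", "WE"), ("THAT", "THEY")]

def grammarcheck_alt (sentence : List String) : Bool :=
  (sentence.zip (sentence.drop 1)).all (fun pair => PySem.Set.contains GRAPH_SET pair)

-- ===== PRECONDITION & SPEC =====
def Spec_grammarcheck (sentence : List String) (out : Bool) : Prop := out = grammarcheck_alt sentence
instance (sentence : List String) (out : Bool) : Decidable (Spec_grammarcheck sentence out) := by unfold Spec_grammarcheck; infer_instance

-- ===== CLAIM (what is proved, stated in full; the proofs are below) =====
def Claim_equal_grammarcheck : Prop := ∀ (sentence : List String), Dom_grammarcheck sentence → Spec_grammarcheck sentence (grammarcheck sentence)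

-- ===== LEMMAS AND PROOFS =====
theorem gs_eval : GRAPH_SET =
    [("WE", "DONT"), ("THEY", "DONT"), ("DONT", "KNOW"), ("WE", "KNOW"),
     ("THEY", "KNOW"), ("KNOW", "WE"), ("KNOW", "THEY"), ("KNOW", "THAT"),
     ("THAT", "WE"), ("THAT", "THEY")] := by decide

theorem edge_mem_iff (a b : String) :
    GRAPH.contains [a, b] = PySem.Set.contains GRAPH_SET (a, b) := by
  simp only [PySem.Set.contains, gs_eval, GRAPH, List.contains_cons,
    List.contains_nil]
  simp [Bool.beq_eq_decide_eq, List.cons.injEq, Prod.mk.injEq]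

theorem grammarcheck_eq_alt (sentence : List String) :
    grammarcheck sentence = grammarcheck_alt sentence := by
  match sentence with
  | [] => rfl
  | [a] => rfl
  | a :: b :: rest =>
    have ih := grammarcheck_eq_alt (b :: rest)
    simp only [grammarcheck, grammarcheck_alt, List.drop_succ_cons, List.drop_zero,
      List.zip_cons_cons, List.all_cons] at *
    rw [edge_mem_iff]
    cases h : PySem.Set.contains GRAPH_SET (a, b) with
    | true => simpa using ih
    | false => simp

-- ===== VERDICT (by name: the statement is the Claim_ definition above) =====
theorem grammarcheck_spec : Claim_equal_grammarcheck := by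
  intro sentence _
  unfold Spec_grammarcheck
  exact grammarcheck_eq_alt sentence
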